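-- pv_equiv track=rewrite | github.com/gphoenix14/tombola_napoletana | tombola.py | controlla_cartella
-- ===== SOURCE A (Python) =====
-- def controlla_cartella(cartella, estratti):
--     risultati = {
--         "ambo": False,
--         "terno": False,
--         "quaterna": False,
--         "cinquina": False,
--         "tombola": False
--     }
--     totale_estratti_nella_cartella = 0
--     for riga in cartella:
--         count_estratti = sum(1 for num in riga if num in estratti)
--         totale_estratti_nella_cartella += count_estratti
--         if count_estratti == 2:
--             risultati["ambo"] = True
--         if count_estratti == 3:
--             risultati["terno"] = True
--         if count_estratti == 4:
--             risultati["quaterna"] = True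
--         if count_estratti == 5:
--             risultati["cinquina"] = True
--     if totale_estratti_nella_cartella == 15:
--         risultati["tombola"] = True
--     return risultati
-- ===== SOURCE B (Python) =====
-- def controlla_cartella(cartella, estratti):
--     # Inverted traversal: iterate over the distinct drawn numbers and
--     # accumulate, per row, how many card cells each one hits.
--     hits = [0] * len(cartella)
--     for e in set(estratti):
--         hits = [h + riga.count(e) for h, riga in zip(hits, cartella)]
--     return {
--         "ambo": 2 in hits,
--         "terno": 3 in hits,
--         "quaterna": 4 in hits,
--         "cinquina": 5 in hits,
--         "tombola": sum(hits) == 15,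
--     }
-- ===== Notes on version B (the rewrite author's own statement) =====
-- stated objective: alternative
-- what changed: Inverts the traversal: instead of A's row loop that tests each cell for membership in estratti and flips dict flags as it goes, B deduplicates the drawn numbers, loops over them accumulating per-row occurrence counts into a hits vector, and derives all prize flags afterwards by membership/sum tests on that vector.
import Mathlib
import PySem

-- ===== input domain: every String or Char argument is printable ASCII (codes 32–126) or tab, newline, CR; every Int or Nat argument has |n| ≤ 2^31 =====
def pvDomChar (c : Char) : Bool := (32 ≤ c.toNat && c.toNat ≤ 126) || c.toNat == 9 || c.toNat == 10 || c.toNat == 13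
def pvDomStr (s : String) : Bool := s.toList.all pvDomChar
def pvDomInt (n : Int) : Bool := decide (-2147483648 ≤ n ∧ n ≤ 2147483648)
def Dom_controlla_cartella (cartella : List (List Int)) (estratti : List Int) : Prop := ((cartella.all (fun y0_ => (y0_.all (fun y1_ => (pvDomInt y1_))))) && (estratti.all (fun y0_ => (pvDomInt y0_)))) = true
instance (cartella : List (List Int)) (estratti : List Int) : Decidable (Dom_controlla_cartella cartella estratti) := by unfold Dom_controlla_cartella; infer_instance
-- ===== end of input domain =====

-- B inverts the traversal: it loops over the distinct drawn numbers accumulating per-row hit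
-- counts into a vector, then derives all flags from that vector (objective: alternative).
-- ===== PORT A =====
-- one loop step of A: count the row's drawn numbers, set flags in the dict, update the running total
def pvStepA (estratti : List Int) (st : PySem.Dict String Bool × Int) (riga : List Int) :
    PySem.Dict String Bool × Int :=
  let count_estratti : Int := ((riga.filter (fun num => decide (num ∈ estratti))).map (fun _ => (1 : Int))).sum
  let r := st.1
  let r := if count_estratti = 2 then r.insert "ambo" true else r
  let r := if count_estratti = 3 then r.insert "terno" true else r
  let r := if count_estratti = 4 then r.insert "quaterna" true else r
  let r := if count_estratti = 5 then r.insert "cinquina" true else r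
  (r, st.2 + count_estratti)

def controlla_cartella (cartella : List (List Int)) (estratti : List Int) : List (String × Bool) :=
  let risultati : PySem.Dict String Bool :=
    PySem.Dict.mk [("ambo", false), ("terno", false), ("quaterna", false), ("cinquina", false), ("tombola", false)]
  let st := cartella.foldl (pvStepA estratti) (risultati, 0)
  let ris := if st.2 = 15 then st.1.insert "tombola" true else st.1
  ris.items

-- ===== PORT B =====
-- hits = [0]*len(cartella); for e in set(estratti): hits = [h + riga.count(e) for h, riga in zip(hits, cartella)]
def controlla_cartella_alt (cartella : List (List Int)) (estratti : List Int) : List (String × Bool) :=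
  let hits0 : List Int := List.replicate cartella.length 0
  let hits : List Int :=
    (PySem.Set.ofList estratti).foldl
      (fun hits e => (hits.zip cartella).map (fun p => p.1 + (PySem.List.count p.2 e : Int))) hits0
  [("ambo", decide ((2 : Int) ∈ hits)),
   ("terno", decide ((3 : Int) ∈ hits)),
   ("quaterna", decide ((4 : Int) ∈ hits)),
   ("cinquina", decide ((5 : Int) ∈ hits)),
   ("tombola", decide (hits.sum = 15))]

-- ===== PRECONDITION & SPEC =====
def Spec_controlla_cartella (cartella : List (List Int)) (estratti : List Int) (out : List (String × Bool)) : Prop := out = controlla_cartella_alt cartella estratti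
instance (cartella : List (List Int)) (estratti : List Int) (out : List (String × Bool)) : Decidable (Spec_controlla_cartella cartella estratti out) := by unfold Spec_controlla_cartella; infer_instance

-- ===== CLAIM =====
def Claim_equal_controlla_cartella : Prop := ∀ (cartella : List (List Int)) (estratti : List Int), Dom_controlla_cartella cartella estratti → Spec_controlla_cartella cartella estratti (controlla_cartella cartella estratti)

-- ===== LEMMAS AND PROOFS =====

-- one step of A's loop, on a dict of the invariant shape
lemma pvStepA_eq (estratti : List Int) (riga : List Int) (a b c d e : Bool) (t0 : Int) :
    pvStepA estratti
      (PySem.Dict.mk [("ambo", a), ("terno", b), ("quaterna", c), ("cinquina", d), ("tombola", e)], t0) riga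
    = (PySem.Dict.mk
        [("ambo", a || decide (((riga.filter (fun num => decide (num ∈ estratti))).map (fun _ => (1 : Int))).sum = 2)),
         ("terno", b || decide (((riga.filter (fun num => decide (num ∈ estratti))).map (fun _ => (1 : Int))).sum = 3)),
         ("quaterna", c || decide (((riga.filter (fun num => decide (num ∈ estratti))).map (fun _ => (1 : Int))).sum = 4)),
         ("cinquina", d || decide (((riga.filter (fun num => decide (num ∈ estratti))).map (fun _ => (1 : Int))).sum = 5)),
         ("tombola", e)],
       t0 + ((riga.filter (fun num => decide (num ∈ estratti))).map (fun _ => (1 : Int))).sum) := by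
  simp only [pvStepA]
  split_ifs with h2 h3 h4 h5 <;> simp_all [PySem.Dict.insert]

-- A's loop invariant: flags accumulate membership of the per-row counts, the total their sum
lemma loopA_inv (estratti : List Int) (cartella : List (List Int)) :
    ∀ (a b c d e : Bool) (t0 : Int),
    cartella.foldl (pvStepA estratti)
      (PySem.Dict.mk [("ambo", a), ("terno", b), ("quaterna", c), ("cinquina", d), ("tombola", e)], t0)
    = (PySem.Dict.mk
        [("ambo", a || decide ((2 : Int) ∈ cartella.map (fun riga => ((riga.filter (fun num => decide (num ∈ estratti))).map (fun _ => (1 : Int))).sum))),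
         ("terno", b || decide ((3 : Int) ∈ cartella.map (fun riga => ((riga.filter (fun num => decide (num ∈ estratti))).map (fun _ => (1 : Int))).sum))),
         ("quaterna", c || decide ((4 : Int) ∈ cartella.map (fun riga => ((riga.filter (fun num => decide (num ∈ estratti))).map (fun _ => (1 : Int))).sum))),
         ("cinquina", d || decide ((5 : Int) ∈ cartella.map (fun riga => ((riga.filter (fun num => decide (num ∈ estratti))).map (fun _ => (1 : Int))).sum))),
         ("tombola", e)],
       t0 + (cartella.map (fun riga => ((riga.filter (fun num => decide (num ∈ estratti))).map (fun _ => (1 : Int))).sum)).sum) := by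
  induction cartella with
  | nil => intro a b c d e t0; simp
  | cons riga rest ih =>
    intro a b c d e t0
    simp only [List.foldl_cons, pvStepA_eq, ih, List.map_cons, List.mem_cons, List.sum_cons,
      Prod.mk.injEq]
    refine ⟨?_, by ring⟩
    simp [Bool.or_assoc, eq_comm]

-- zip-then-map over pairs is zipWith
lemma zip_map_eq_zipWith {α β γ : Type} (f : α → β → γ) :
    ∀ (l : List α) (l' : List β), (l.zip l').map (fun p => f p.1 p.2) = List.zipWith f l l' := by
  intro l l'
  induction l generalizing l' with
  | nil => simp
  | cons x t ih => cases l' <;> simp [ih]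

-- composing a second zipWith against the same right list
lemma zipWith_zipWith {α β γ δ : Type} (f : γ → β → δ) (g : α → β → γ) :
    ∀ (l : List α) (l' : List β),
      List.zipWith f (List.zipWith g l l') l' = List.zipWith (fun a b => f (g a b) b) l l' := by
  intro l l'
  induction l generalizing l' with
  | nil => simp
  | cons x t ih => cases l' <;> simp [ih]

lemma zipWith_fst {α β : Type} :
    ∀ (l : List α) (l' : List β), l.length = l'.length →
      List.zipWith (fun a _ => a) l l' = l := by
  intro l l'
  induction l generalizing l' with
  | nil => simp
  | cons x t ih => cases l' <;> simp_all

lemma zipWith_replicate_left {α β γ : Type} (f : α → β → γ) (a : α) :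
    ∀ (l : List β), List.zipWith f (List.replicate l.length a) l = l.map (f a) := by
  intro l; induction l with
  | nil => simp
  | cons x t ih => simp [List.replicate_succ, ih]

-- B's loop invariant: folding the step over es adds Σ_{e∈es} count(riga, e) to each slot
lemma loopB_inv (cartella : List (List Int)) (es : List Int) :
    ∀ (hits : List Int), hits.length = cartella.length →
      es.foldl (fun hits e => (hits.zip cartella).map
          (fun p => p.1 + (PySem.List.count p.2 e : Int))) hits
      = List.zipWith (fun h riga => h + ((es.map (fun e => (PySem.List.count riga e : Int))).sum)) hits cartella := by
  induction es with
  | nil =>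
    intro hits hlen
    simpa using (zipWith_fst hits cartella hlen).symm
  | cons e rest ih =>
    intro hits hlen
    rw [List.foldl_cons, ih ((hits.zip cartella).map (fun p => p.1 + (PySem.List.count p.2 e : Int)))
        (by simp [hlen]),
      zip_map_eq_zipWith (fun (a : Int) (b : List Int) => a + (PySem.List.count b e : Int)) hits cartella,
      zipWith_zipWith]
    congr 1
    funext a b
    simp [add_assoc]

-- a 0/1 indicator summed over a duplicate-free list is a membership test
lemma sum_indicator (x : Int) :
    ∀ (S : List Int), S.Nodup →
      (S.map (fun e => if e = x then (1 : Int) else 0)).sum = if x ∈ S then 1 else 0 := by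
  intro S
  induction S with
  | nil => intro _; simp
  | cons y s ih =>
    intro h
    rcases List.nodup_cons.mp h with ⟨hy, hs⟩
    by_cases hxy : y = x
    · subst hxy
      have hz : (s.map (fun e => if e = y then (1 : Int) else 0)).sum = 0 := by
        apply List.sum_eq_zero
        intro z hz
        rcases List.mem_map.mp hz with ⟨w, hw, rfl⟩
        have : w ≠ y := fun h' => hy (h' ▸ hw)
        simp [this]
      simp [hz]
    · have hx' : x ≠ y := fun h' => hxy h'.symm
      simp [List.mem_cons, hx', hxy, ih hs]

lemma sum_map_add_int (f g : Int → Int) :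
    ∀ (S : List Int), (S.map (fun e => f e + g e)).sum = (S.map f).sum + (S.map g).sum := by
  intro S
  induction S with
  | nil => simp
  | cons y s ih => simp [ih]; ring

-- counting: summing count(riga, e) over the distinct drawn numbers = membership count in the row
lemma sum_count_dedup (estratti : List Int) (riga : List Int) :
    ((PySem.Set.ofList estratti).map (fun e => (PySem.List.count riga e : Int))).sum
      = ((riga.filter (fun num => decide (num ∈ estratti))).map (fun _ => (1 : Int))).sum := by
  induction riga with
  | nil => simp [PySem.List.count_eq]
  | cons x t ih =>
    have hcount : ∀ e : Int, (PySem.List.count (x :: t) e : Int)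
        = (PySem.List.count t e : Int) + (if e = x then 1 else 0) := by
      intro e
      simp only [PySem.List.count_eq, List.count_cons]
      split_ifs with h <;> simp_all
    have hsplit : ((PySem.Set.ofList estratti).map (fun e => (PySem.List.count (x :: t) e : Int))).sum
        = ((PySem.Set.ofList estratti).map (fun e => (PySem.List.count t e : Int))).sum
          + ((PySem.Set.ofList estratti).map (fun e => if e = x then (1 : Int) else 0)).sum := by
      rw [← sum_map_add_int (fun e => (PySem.List.count t e : Int)) (fun e => if e = x then (1 : Int) else 0)]
      exact congrArg List.sum (List.map_congr_left (fun e _ => hcount e))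
    have hind := sum_indicator x (PySem.Set.ofList estratti) (PySem.Set.nodup_ofList estratti)
    have hmemI : x ∈ PySem.Set.ofList estratti ↔ x ∈ estratti := PySem.Set.mem_ofList estratti x
    rw [hsplit, ih, hind]
    simp only [hmemI]
    by_cases hx : x ∈ estratti
    · simp [hx, add_comm]
    · simp [hx]

-- ===== VERDICT =====
theorem controlla_cartella_spec : Claim_equal_controlla_cartella := by
  intro cartella estratti _
  unfold Spec_controlla_cartella controlla_cartella controlla_cartella_alt
  simp only [loopA_inv, Bool.false_or, Int.zero_add]
  rw [loopB_inv cartella (PySem.Set.ofList estratti) (List.replicate cartella.length 0) (by simp),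
    zipWith_replicate_left]
  simp only [Int.zero_add]
  have hmap : cartella.map (fun riga => ((PySem.Set.ofList estratti).map (fun e => (PySem.List.count riga e : Int))).sum)
      = cartella.map (fun riga => ((riga.filter (fun num => decide (num ∈ estratti))).map (fun _ => (1 : Int))).sum) := by
    exact List.map_congr_left (fun riga _ => sum_count_dedup estratti riga)
  rw [hmap]
  set s := (cartella.map (fun riga => ((riga.filter (fun num => decide (num ∈ estratti))).map (fun _ => (1 : Int))).sum)).sum
  split_ifs with h
  · simp only [PySem.Dict.insert, h]
    simp
  · simp [h]
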